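-- pv_equiv track=rewrite | github.com/Radcliffe/OEIS-Python | src/oeispy/A227/A227192.py | A227192
-- ===== SOURCE A (Python) =====
-- def A227192(n):
--   '''Sum of the partial sums of the run lengths of binary expansion of n, starting from the least significant end.'''
--   s = 0
--   b = n%2
--   i = 0
--   while (n != 0):
--     n >>= 1
--     i += 1
--     if((n%2) != b):
--       b = n%2
--       s += i
--   return(s)
-- ===== SOURCE B (Python) =====
-- def A227192(n):
--     '''Sum of the partial sums of the run lengths of binary expansion of n, starting from the least significant end.'''
--     # Phase 1: materialize the bits, least significant first.
--     bits = []
--     while n != 0: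
--         bits.append(n % 2)
--         n >>= 1
--     # Phase 2: group the bits into run lengths (LSB-first).
--     runs = []
--     prev = None
--     for b in bits:
--         if runs and b == prev:
--             runs[-1] += 1
--         else:
--             runs.append(1)
--             prev = b
--     # Phase 3: sum of the partial sums of the run lengths.
--     total = 0
--     acc = 0
--     for r in runs:
--         acc += r
--         total += acc
--     return total
-- ===== Notes on version B (the rewrite author's own statement) =====
-- stated objective: alternative
-- what changed: A fuses everything into one bit loop that accumulates change positions; B runs three separate phases: materialize the LSB-first bit list, group it into run lengths, then take the sum of partial sums with a running-prefix accumulator.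
import Mathlib
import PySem

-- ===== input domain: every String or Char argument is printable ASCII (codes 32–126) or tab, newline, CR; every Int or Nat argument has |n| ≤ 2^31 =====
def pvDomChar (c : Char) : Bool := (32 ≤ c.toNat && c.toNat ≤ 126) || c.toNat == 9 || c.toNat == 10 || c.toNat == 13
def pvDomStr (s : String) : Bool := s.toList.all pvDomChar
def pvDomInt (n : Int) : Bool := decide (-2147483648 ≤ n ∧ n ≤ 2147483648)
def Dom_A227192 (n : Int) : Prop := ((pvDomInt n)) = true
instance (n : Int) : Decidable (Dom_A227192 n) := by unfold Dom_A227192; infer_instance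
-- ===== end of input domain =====

-- B replaces A's fused bit loop by three separate phases (bit list, run-length grouping, sum of partial sums); objective: alternative decomposition, same cost.


-- ===== PORT A =====
-- while (n != 0): n >>= 1; i += 1; if (n%2) != b: b = n%2; s += i
-- guard '0 < n' instead of 'n ≠ 0': for n < 0 Python's loop never terminates (outside Pre_).
def A227192.loop (n b i s : Int) : Int :=
  if h : 0 < n then
    let n' := PySem.Int.floordiv n 2
    let b' := PySem.Int.mod n' 2
    if b' ≠ b then A227192.loop n' b' (i + 1) (s + (i + 1))
    else A227192.loop n' b (i + 1) s
  else s
termination_by n.toNat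
decreasing_by
  all_goals
    simp only [PySem.Int.floordiv_eq_ediv_of_pos (by omega : (0:Int) < 2)]
    omega

def A227192 (n : Int) : Int := A227192.loop n (PySem.Int.mod n 2) 0 0

-- ===== PORT B =====
-- phase 1: bits.append(n % 2); n >>= 1   (same totality guard as A's port: Python diverges for n < 0)
def A227192_alt.bits (n : Int) (acc : List Int) : List Int :=
  if h : 0 < n then
    A227192_alt.bits (PySem.Int.floordiv n 2) (acc ++ [PySem.Int.mod n 2])
  else acc
termination_by n.toNat
decreasing_by
  simp only [PySem.Int.floordiv_eq_ediv_of_pos (by omega : (0:Int) < 2)]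
  omega

-- runs[-1] += 1
def A227192_alt.incLast : List Int → List Int
  | [] => []
  | [r] => [r + 1]
  | r :: rs => r :: A227192_alt.incLast rs

-- phase 2: for b in bits: if runs and b == prev: runs[-1] += 1 else: runs.append(1); prev = b
def A227192_alt.group (runs : List Int) (prev : Option Int) : List Int → List Int
  | [] => runs
  | b :: rest =>
    if runs ≠ [] ∧ prev = some b then A227192_alt.group (A227192_alt.incLast runs) prev rest
    else A227192_alt.group (runs ++ [1]) (some b) rest

-- phase 3: for r in runs: acc += r; total += acc
def A227192_alt.sumLoop (acc total : Int) : List Int → Int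
  | [] => total
  | r :: rs => A227192_alt.sumLoop (acc + r) (total + (acc + r)) rs

def A227192_alt (n : Int) : Int :=
  A227192_alt.sumLoop 0 0 (A227192_alt.group [] none (A227192_alt.bits n []))

-- ===== PRECONDITION & SPEC =====
-- Pre_ excludes n < 0, on which Python A never returns (the while loop runs forever: n >> 1 stabilises at -1).
def Pre_A227192 (n : Int) : Prop := 0 ≤ n
instance (n : Int) : Decidable (Pre_A227192 n) := by unfold Pre_A227192; infer_instance
def pvWitness_A227192 : Int := 6

def Spec_A227192 (n : Int) (out : Int) : Prop := out = A227192_alt n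
instance (n : Int) (out : Int) : Decidable (Spec_A227192 n out) := by unfold Spec_A227192; infer_instance

-- ===== CLAIM (what is proved, stated in full; the proofs are below) =====
def Claim_equal_A227192 : Prop := ∀ (n : Int), Dom_A227192 n → Pre_A227192 n → Spec_A227192 n (A227192 n)

-- ===== LEMMAS AND PROOFS =====

-- bits without the accumulator
def pvBits (n : Int) : List Int := A227192_alt.bits n []

-- A's loop replayed over the bit list: b is the current bit, the next bit (or 0 at the end) is compared with it
def pvF : List Int → Int → Int → Int → Int
  | [], _, _, s => s
  | _ :: rest, b, i, s =>
    if rest.headD 0 ≠ b then pvF rest (rest.headD 0) (i + 1) (s + (i + 1))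
    else pvF rest b (i + 1) s

-- run lengths of a list whose current open run has value p and length r
def pvRunsFrom (r p : Int) : List Int → List Int
  | [] => [r]
  | b :: bs => if b = p then pvRunsFrom (r + 1) p bs else r :: pvRunsFrom 1 b bs

-- sum of partial sums, back-to-front closed recursion
def pvPss : List Int → Int
  | [] => 0
  | r :: rs => r * ((rs.length : Int) + 1) + pvPss rs

theorem pvBits_nonpos {n : Int} (h : ¬ 0 < n) : pvBits n = [] := by
  unfold pvBits A227192_alt.bits; simp [h]

theorem pvBits_acc (n : Int) : ∀ acc, A227192_alt.bits n acc = acc ++ pvBits n := by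
  intro acc
  by_cases h : 0 < n
  · rw [A227192_alt.bits, dif_pos h,
      pvBits_acc (PySem.Int.floordiv n 2) (acc ++ [PySem.Int.mod n 2])]
    conv_rhs => rw [pvBits, A227192_alt.bits, dif_pos h]
    rw [pvBits_acc (PySem.Int.floordiv n 2) ([] ++ [PySem.Int.mod n 2])]
    simp
  · rw [A227192_alt.bits, dif_neg h, pvBits_nonpos h]; simp
termination_by n.toNat
decreasing_by all_goals
  (simp only [PySem.Int.floordiv_eq_ediv_of_pos (by omega : (0:Int) < 2)]; omega)

theorem pvBits_pos {n : Int} (h : 0 < n) :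
    pvBits n = PySem.Int.mod n 2 :: pvBits (PySem.Int.floordiv n 2) := by
  conv_lhs => rw [pvBits, A227192_alt.bits, dif_pos h]
  rw [pvBits_acc]; simp

theorem pvBits_headD {n : Int} (h : 0 ≤ n) : (pvBits n).headD 0 = PySem.Int.mod n 2 := by
  rcases lt_or_eq_of_le h with hp | hz
  · rw [pvBits_pos hp]; rfl
  · rw [pvBits_nonpos (by omega), ← hz]; rfl

theorem pvBits_last {n : Int} (h : 0 < n) : (pvBits n).getLast? = some 1 := by
  rw [pvBits_pos h]
  by_cases h2 : 0 < PySem.Int.floordiv n 2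
  · rw [pvBits_pos h2]
    rw [List.getLast?_cons_cons, ← pvBits_pos h2]
    exact pvBits_last h2
  · have hdiv : PySem.Int.floordiv n 2 = n / 2 :=
      PySem.Int.floordiv_eq_ediv_of_pos (by omega)
    have hn1 : n = 1 := by omega
    rw [pvBits_nonpos h2, hn1]
    decide
termination_by n.toNat
decreasing_by
  simp only [PySem.Int.floordiv_eq_ediv_of_pos (by omega : (0:Int) < 2)]; omega

theorem pvLoop_eq_pvF (n : Int) : ∀ b i s, A227192.loop n b i s = pvF (pvBits n) b i s := by
  intro b i s
  by_cases h : 0 < n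
  · have hd2 : (0:Int) ≤ PySem.Int.floordiv n 2 := by
      simp only [PySem.Int.floordiv_eq_ediv_of_pos (by omega : (0:Int) < 2)]; omega
    rw [A227192.loop, dif_pos h, pvBits_pos h]
    simp only [pvF, pvBits_headD hd2]
    split_ifs with hb
    · exact pvLoop_eq_pvF (PySem.Int.floordiv n 2) _ _ _
    · exact pvLoop_eq_pvF (PySem.Int.floordiv n 2) _ _ _
  · rw [A227192.loop, dif_neg h, pvBits_nonpos h]; rfl
termination_by n.toNat
decreasing_by all_goals
  (simp only [PySem.Int.floordiv_eq_ediv_of_pos (by omega : (0:Int) < 2)]; omega)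

theorem pvIncLast_append (pre : List Int) (r : Int) :
    A227192_alt.incLast (pre ++ [r]) = pre ++ [r + 1] := by
  induction pre with
  | nil => rfl
  | cons x xs ih =>
    cases xs with
    | nil => rfl
    | cons y ys =>
      show x :: A227192_alt.incLast ((y :: ys) ++ [r]) = _
      rw [ih]; rfl

theorem pvGroup_inv (bs : List Int) : ∀ pre r p,
    A227192_alt.group (pre ++ [r]) (some p) bs = pre ++ pvRunsFrom r p bs := by
  induction bs with
  | nil => intro pre r p; simp [A227192_alt.group, pvRunsFrom]
  | cons b rest ih =>
    intro pre r p
    by_cases hb : b = p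
    · rw [A227192_alt.group, if_pos ⟨by simp, by rw [hb]⟩, pvIncLast_append, ih]
      simp [pvRunsFrom, hb]
    · rw [A227192_alt.group,
        if_neg (fun hc => hb ((Option.some.inj hc.2).symm)),
        ih (pre ++ [r]) 1 b]
      simp [pvRunsFrom, hb]

theorem pvSumLoop_eq (rs : List Int) : ∀ acc total,
    A227192_alt.sumLoop acc total rs = total + (rs.length : Int) * acc + pvPss rs := by
  induction rs with
  | nil => intro acc total; simp [A227192_alt.sumLoop, pvPss]
  | cons r rest ih =>
    intro acc total
    rw [A227192_alt.sumLoop, ih, pvPss]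
    simp only [List.length_cons]
    push_cast
    ring

theorem pvF_main (bs : List Int) : ∀ b r i s, (b :: bs).getLast? = some 1 →
    pvF (b :: bs) b i s
      = s + ((pvRunsFrom r b bs).length : Int) * (i + 1 - r) + pvPss (pvRunsFrom r b bs) := by
  induction bs with
  | nil =>
    intro b r i s hlast
    have hb : b = 1 := by simpa using hlast
    simp [pvF, pvRunsFrom, pvPss, hb]
    ring_nf
  | cons y rest ih =>
    intro b r i s hlast
    have hlast2 : (y :: rest).getLast? = some 1 := by
      rwa [List.getLast?_cons_cons] at hlast
    by_cases hy : y = b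
    · subst hy
      rw [pvF]
      simp only [List.headD_cons]
      rw [if_neg (by simp)]
      rw [ih y (r + 1) (i + 1) s hlast2]
      simp only [pvRunsFrom, if_true]
      ring_nf
    · rw [pvF]
      simp only [List.headD_cons]
      rw [if_pos hy]
      rw [ih y 1 (i + 1) (s + (i + 1)) hlast2]
      simp only [pvRunsFrom, if_neg hy, pvPss, List.length_cons]
      push_cast
      ring

-- ===== VERDICT (by name: the statement is the Claim_ definition above) =====
theorem A227192_spec : Claim_equal_A227192 := by
  intro n _ hpre
  unfold Spec_A227192 A227192 A227192_alt
  rw [pvLoop_eq_pvF]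
  show pvF (pvBits n) _ 0 0 = A227192_alt.sumLoop 0 0 (A227192_alt.group [] none (pvBits n))
  rcases lt_or_eq_of_le hpre with hp | hz
  · rw [pvBits_pos hp, ← pvBits_headD (le_of_lt hp), pvBits_pos hp]
    have hlast : (PySem.Int.mod n 2 :: pvBits (PySem.Int.floordiv n 2)).getLast? = some 1 := by
      rw [← pvBits_pos hp]; exact pvBits_last hp
    rw [List.headD_cons,
      pvF_main (pvBits (PySem.Int.floordiv n 2)) (PySem.Int.mod n 2) 1 0 0 hlast]
    rw [A227192_alt.group, if_neg (by simp)]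
    rw [show ([] ++ [(1:Int)]) = ([] ++ [(1:Int)]) from rfl, pvGroup_inv]
    rw [pvSumLoop_eq]
    simp
  · rw [pvBits_nonpos (by omega)]
    rfl
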